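-- pv_equiv track=rewrite | github.com/ciminomariano/turingtest | main.py | calculate_typing_time
-- ===== SOURCE A (Python) =====
-- def calculate_typing_time(digits, num):
--     positions = {digit: i for i, digit in enumerate(digits)}
--     current_position = 0
--     total_time = 0
--
--     for digit in num:
--         target_position = positions[digit]
--         total_time += abs(target_position - current_position)
--         current_position = target_position
--
--     return total_time
-- ===== SOURCE B (Python) =====
-- def calculate_typing_time(digits, num):
--     positions = {digit: i for i, digit in enumerate(digits)}
--     if not num:
--         return 0
--     # group identical adjacent-digit transitions, then weight each by its multiplicity
--     transitions = {}
--     for pair in zip(num, num[1:]):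
--         transitions[pair] = transitions.get(pair, 0) + 1
--     total = abs(positions[num[0]])
--     for (a, b), count in transitions.items():
--         total += count * abs(positions[b] - positions[a])
--     return total
-- ===== Notes on version B (the rewrite author's own statement) =====
-- stated objective: alternative
-- what changed: Instead of A's fused streaming loop threading a current_position accumulator, B builds a multiset (dict counter) of adjacent digit transitions and computes the total as the first move plus sum of count * |pos[b]-pos[a]| over the distinct transitions.
import Mathlib
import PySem

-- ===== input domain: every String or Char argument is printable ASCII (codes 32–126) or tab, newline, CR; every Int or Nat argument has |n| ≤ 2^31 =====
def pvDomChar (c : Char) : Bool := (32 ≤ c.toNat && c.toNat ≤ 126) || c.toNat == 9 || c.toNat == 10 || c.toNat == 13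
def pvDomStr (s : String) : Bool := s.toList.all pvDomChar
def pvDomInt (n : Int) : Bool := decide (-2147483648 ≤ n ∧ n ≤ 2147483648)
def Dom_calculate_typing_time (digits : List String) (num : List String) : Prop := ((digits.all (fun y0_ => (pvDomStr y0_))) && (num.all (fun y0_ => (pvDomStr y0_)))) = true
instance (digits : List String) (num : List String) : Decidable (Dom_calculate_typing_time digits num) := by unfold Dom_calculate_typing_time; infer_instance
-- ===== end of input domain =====

-- B replaces A's fused streaming loop (running position + running total) by a grouped computation:
-- it counts each distinct adjacent digit transition once in a dict and sums count * distance;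
-- same asymptotic cost, a genuinely different (multiset-of-transitions) algorithm.

-- ===== PORT A =====
-- positions = {digit: i for i, digit in enumerate(digits)}  (identical line in A and in B)
def pvPos (digits : List String) : PySem.Dict String Int :=
  (PySem.List.enumerate digits).foldl (fun d p => d.insert p.2 p.1) PySem.Dict.empty

def calculate_typing_time (digits : List String) (num : List String) : Int :=
  let positions : PySem.Dict String Int := pvPos digits
  -- Python raises KeyError when a digit of num is missing from positions; Pre_ excludes that,
  -- so the total form getD … 0 is exact on Pre_
  (num.foldl (fun (st : Int × Int) digit =>
      let target := positions.getD digit 0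
      (target, st.2 + |target - st.1|)) (0, 0)).2

-- ===== PORT B =====
def calculate_typing_time_alt (digits : List String) (num : List String) : Int :=
  let positions : PySem.Dict String Int := pvPos digits
  match num with
  | [] => 0
  | d0 :: _ =>
    let transitions : PySem.Dict (String × String) Int :=
      (num.zip num.tail).foldl (fun t pair => t.insert pair (t.getD pair 0 + 1)) PySem.Dict.empty
    transitions.items.foldl
      (fun acc kc => acc + kc.2 * |positions.getD kc.1.2 0 - positions.getD kc.1.1 0|)
      |positions.getD d0 0|

-- ===== PRECONDITION & SPEC =====
-- Pre_ excludes exactly the inputs where A raises KeyError: some element of num not among digits.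
def Pre_calculate_typing_time (digits : List String) (num : List String) : Prop :=
  ∀ d ∈ num, d ∈ digits
instance (digits : List String) (num : List String) : Decidable (Pre_calculate_typing_time digits num) := by unfold Pre_calculate_typing_time; infer_instance

def pvWitness_calculate_typing_time : List String × List String :=
  (["1", "2", "3"], ["2", "1", "3", "3"])

def Spec_calculate_typing_time (digits : List String) (num : List String) (out : Int) : Prop := out = calculate_typing_time_alt digits num
instance (digits : List String) (num : List String) (out : Int) : Decidable (Spec_calculate_typing_time digits num out) := by unfold Spec_calculate_typing_time; infer_instance

-- ===== CLAIM (what is proved, stated in full; the proofs are below) =====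
def Claim_equal_calculate_typing_time : Prop := ∀ (digits : List String) (num : List String), Dom_calculate_typing_time digits num → Pre_calculate_typing_time digits num → Spec_calculate_typing_time digits num (calculate_typing_time digits num)

-- ===== LEMMAS AND PROOFS =====

-- the path cost of visiting f d for d in l, starting at cur
def pathSum (f : String → Int) : Int → List String → Int
  | _, [] => 0
  | cur, d :: rest => |f d - cur| + pathSum f (f d) rest

-- A's fused fold computes tot + pathSum
theorem fused_eq_pathSum (f : String → Int) (l : List String) (cur tot : Int) :
    (l.foldl (fun (st : Int × Int) d => (f d, st.2 + |f d - st.1|)) (cur, tot)).2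
      = tot + pathSum f cur l := by
  induction l generalizing cur tot with
  | nil => simp [pathSum]
  | cons d rest ih => simp [pathSum, ih (f d) (tot + |f d - cur|)]; ring

-- pathSum from f d over rest is the sum of distances over adjacent pairs
theorem pathSum_eq_pairs (f : String → Int) (rest : List String) (d : String) :
    pathSum f (f d) rest
      = (((d :: rest).zip rest).map (fun p => |f p.2 - f p.1|)).sum := by
  induction rest generalizing d with
  | nil => simp [pathSum]
  | cons e rs ih => simp [pathSum, List.zip, ih e]

-- indicator sum over a Nodup list
theorem sum_ite_nodup {κ : Type} [DecidableEq κ] (w : κ → Int) (S : List κ) (p : κ)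
    (hnd : S.Nodup) (hp : p ∈ S) :
    (S.map (fun k => if p = k then w k else 0)).sum = w p := by
  induction S with
  | nil => cases hp
  | cons s S ih =>
    have hnds := List.nodup_cons.mp hnd
    rcases List.mem_cons.mp hp with h | h
    · subst h
      have hz : (S.map (fun k => if p = k then w k else 0)).sum = 0 := by
        apply List.sum_eq_zero
        intro x hx
        simp only [List.mem_map] at hx
        obtain ⟨k, hk, rfl⟩ := hx
        have : p ≠ k := fun h => hnds.1 (h ▸ hk)
        simp [this]
      simp [hz]
    · have hps : p ≠ s := fun he => hnds.1 (he ▸ h)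
      simp [hps, ih hnds.2 h]

-- grouping: summing w over a list equals summing count * w over any Nodup cover
theorem grouped_sum {κ : Type} [BEq κ] [LawfulBEq κ] [DecidableEq κ] (w : κ → Int) (P S : List κ)
    (hnd : S.Nodup) (hsub : ∀ p ∈ P, p ∈ S) :
    (S.map (fun k => (P.count k : Int) * w k)).sum = (P.map w).sum := by
  induction P with
  | nil => simp
  | cons p Q ih =>
    have hQ : ∀ q ∈ Q, q ∈ S := fun q hq => hsub q (List.mem_cons_of_mem _ hq)
    have hsplit :
        (S.map (fun k => ((p :: Q).count k : Int) * w k)).sum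
          = (S.map (fun k => (Q.count k : Int) * w k)).sum
            + (S.map (fun k => if p = k then w k else 0)).sum := by
      rw [← List.sum_map_add]
      apply congrArg
      apply List.map_congr_left
      intro k _
      by_cases h : p = k
      · subst h; simp [List.count_cons_self]; ring
      · have : k ≠ p := fun hk => h hk.symm
        simp [h]
    rw [hsplit, ih hQ, sum_ite_nodup w S p hnd (hsub p (List.mem_cons_self ..)),
      List.map_cons, List.sum_cons]
    ring

-- ===== VERDICT (by name: the statement is the Claim_ definition above) =====
theorem calculate_typing_time_spec : Claim_equal_calculate_typing_time := by
  intro digits num _ _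
  unfold Spec_calculate_typing_time calculate_typing_time calculate_typing_time_alt
  cases num with
  | nil => simp
  | cons d0 rest =>
    simp only [List.tail_cons, PySem.Dict.foldl_insert_getD_add_one_eq_counter]
    have hA :
        ((d0 :: rest).foldl (fun (st : Int × Int) digit =>
            (pvPos digits |>.getD digit 0, st.2 + |(pvPos digits).getD digit 0 - st.1|)) (0, 0)).2
          = |(pvPos digits).getD d0 0|
            + ((((d0 :: rest).zip rest).map
                (fun p => |(pvPos digits).getD p.2 0 - (pvPos digits).getD p.1 0|)).sum) := by
      rw [fused_eq_pathSum (fun d => (pvPos digits).getD d 0)]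
      simp [pathSum, pathSum_eq_pairs (fun d => (pvPos digits).getD d 0) rest d0]
    have hB :
        (PySem.Dict.counter ((d0 :: rest).zip rest)).items.foldl
            (fun acc kc => acc + kc.2 * |(pvPos digits).getD kc.1.2 0 - (pvPos digits).getD kc.1.1 0|)
            |(pvPos digits).getD d0 0|
          = |(pvPos digits).getD d0 0|
            + ((((d0 :: rest).zip rest).map
                (fun p => |(pvPos digits).getD p.2 0 - (pvPos digits).getD p.1 0|)).sum) := by
      rw [PySem.List.foldl_add]
      congr 1
      rw [PySem.Dict.items_counter, List.map_map, ← PySem.List.dedup_eq_ofList]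
      simpa [Function.comp_def] using
        grouped_sum (fun p => |(pvPos digits).getD p.2 0 - (pvPos digits).getD p.1 0|)
          ((d0 :: rest).zip rest) (PySem.List.dedup ((d0 :: rest).zip rest))
          (PySem.List.nodup_dedup _) (fun p hp => (PySem.List.mem_dedup _ _).mpr hp)
    exact hA.trans hB.symm
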